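-- pv_equiv track=rewrite | github.com/LeePaDack/Test | 프로그래머스/0/181881. 조건에 맞게 수열 변환하기 2/조건에 맞게 수열 변환하기 2.py | solution
-- ===== SOURCE A (Python) =====
-- def solution(arr):
--     def transform(arr):
--         new_arr = []
--         for num in arr:
--             if num >= 50 and num % 2 == 0:
--                 new_arr.append(num // 2)
--             elif num < 50 and num % 2 == 1:
--                 new_arr.append(num * 2 + 1)
--             else:
--                 new_arr.append(num)
--         return new_arr
--
--     seen = {}
--     x = 0
--     while True:
--         if tuple(arr) in seen:  # 원래의 배열을 체크
--             return seen[tuple(arr)]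
--         seen[tuple(arr)] = x
--         arr = transform(arr)
--         x += 1
-- ===== SOURCE B (Python) =====
-- def solution(arr):
--     def steps(n):
--         c = 0
--         while True:
--             if n >= 50 and n % 2 == 0:
--                 m = n // 2
--             elif n < 50 and n % 2 == 1:
--                 m = n * 2 + 1
--             else:
--                 m = n
--             if m == n:
--                 return c
--             n = m
--             c += 1
--     return max((steps(n) for n in arr), default=0)
-- ===== Notes on version B (the rewrite author's own statement) =====
-- stated objective: alternative
-- what changed: Replaces A's whole-array fixed-point loop keyed by a dict of seen tuples with independent per-element step counting (apply the single-element transform until the value stops changing) and a final max over elements, relying on the map having no nontrivial cycles.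
import Mathlib
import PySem

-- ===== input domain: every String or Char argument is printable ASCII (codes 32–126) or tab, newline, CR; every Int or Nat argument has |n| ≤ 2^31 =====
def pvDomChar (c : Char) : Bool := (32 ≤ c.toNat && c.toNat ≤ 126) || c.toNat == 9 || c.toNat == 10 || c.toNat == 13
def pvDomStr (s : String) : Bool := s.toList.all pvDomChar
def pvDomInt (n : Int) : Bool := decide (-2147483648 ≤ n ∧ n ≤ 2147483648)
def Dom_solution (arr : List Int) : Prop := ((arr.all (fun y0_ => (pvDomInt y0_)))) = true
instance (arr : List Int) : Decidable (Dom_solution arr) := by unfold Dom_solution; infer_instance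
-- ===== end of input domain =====

-- B replaces A's whole-array fixed-point loop with dict of seen tuples by independent
-- per-element step counting and a final max (alternative decomposition, no dict needed).

-- ===== PORT A =====
-- A's inner `transform`: one pass appending the transformed element.
def pvATransform (arr : List Int) : List Int :=
  arr.foldl (fun new_arr num =>
    if 50 ≤ num ∧ PySem.Int.mod num 2 = 0 then new_arr ++ [PySem.Int.floordiv num 2]
    else if num < 50 ∧ PySem.Int.mod num 2 = 1 then new_arr ++ [num * 2 + 1]
    else new_arr ++ [num]) []

-- A's `while True` loop over (seen, x, arr); fuel only makes it total (≤ 98 iterations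
-- are ever reached on inputs satisfying Pre_solution, proved below).
def pvALoop : Nat → PySem.Dict (List Int) Int → Int → List Int → Int
  | 0, _, _, _ => 0
  | f+1, seen, x, arr =>
    match seen.get? arr with
    | some v => v
    | none => pvALoop f (seen.insert arr x) (x + 1) (pvATransform arr)

def solution (arr : List Int) : Int := pvALoop 100 PySem.Dict.empty 0 arr

-- ===== PORT B =====
-- B's `steps(n)`: apply the single-element transform until the value stops changing;
-- fuel only makes it total (≤ 98 iterations are reached on Pre_solution inputs).
def pvBSteps : Nat → Int → Int → Int
  | 0, _, c => c
  | f+1, n, c =>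
    let m := if 50 ≤ n ∧ PySem.Int.mod n 2 = 0 then PySem.Int.floordiv n 2
             else if n < 50 ∧ PySem.Int.mod n 2 = 1 then n * 2 + 1
             else n
    if m = n then c else pvBSteps f m (c + 1)

def solution_alt (arr : List Int) : Int :=
  ((arr.map (fun n => pvBSteps 100 n 0)).max?).getD 0

-- ===== PRECONDITION & SPEC =====
-- Pre_ excludes arrays containing an odd element below -1: on those A's element map
-- strictly decreases that element forever, the array never repeats, and A never returns
-- (B's loop never returns there either); on every other input A returns normally.
def Pre_solution (arr : List Int) : Prop := ∀ n ∈ arr, n % 2 = 0 ∨ -1 ≤ n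
instance (arr : List Int) : Decidable (Pre_solution arr) := by unfold Pre_solution; infer_instance
def pvWitness_solution : List Int := [100, 3, -1, 0, 51]

def Spec_solution (arr : List Int) (out : Int) : Prop := out = solution_alt arr
instance (arr : List Int) (out : Int) : Decidable (Spec_solution arr out) := by unfold Spec_solution; infer_instance

-- ===== CLAIM (what is proved, stated in full; the proofs are below) =====
def Claim_equal_solution : Prop := ∀ (arr : List Int), Dom_solution arr → Pre_solution arr → Spec_solution arr (solution arr)

-- ===== LEMMAS AND PROOFS =====

-- the single-element transform both programs use
def pvT (n : Int) : Int :=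
  if 50 ≤ n ∧ PySem.Int.mod n 2 = 0 then PySem.Int.floordiv n 2
  else if n < 50 ∧ PySem.Int.mod n 2 = 1 then n * 2 + 1
  else n

-- trajectory invariant: every non-fixed value reachable under Pre_ is nonnegative
def pvInv (n : Int) : Prop := 0 ≤ n ∨ pvT n = n

-- termination measure: strictly decreases along non-fixed steps, < 98 on the domain
def pvMu (n : Int) : Nat :=
  if pvT n = n then 0 else if 50 ≤ n then 46 + Nat.log 2 n.toNat else (64 - n).toNat

-- per-element step count (what B's map computes)
def pvS (n : Int) : Int := pvBSteps 100 n 0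

-- clamped predecessor: effect of one transform step on a step count
def pvG (y : Int) : Int := max 0 (y - 1)

lemma pvT_eq (n : Int) :
    pvT n = if 50 ≤ n ∧ n % 2 = 0 then n / 2 else if n < 50 ∧ n % 2 = 1 then n * 2 + 1 else n := by
  unfold pvT
  rw [PySem.Int.mod_eq_emod_of_pos (by norm_num), PySem.Int.floordiv_eq_ediv_of_pos (by norm_num)]

lemma pvBSteps_succ (f : Nat) (n c : Int) :
    pvBSteps (f+1) n c = if pvT n = n then c else pvBSteps f (pvT n) (c + 1) := rfl

lemma pvInv_step (n : Int) (h : pvInv n) : pvInv (pvT n) := by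
  rcases h with h | h
  · left
    rw [pvT_eq]
    split_ifs <;> omega
  · rw [h]; exact Or.inr h

lemma pvMu_zero (n : Int) (h : pvMu n = 0) : pvT n = n := by
  unfold pvMu at h
  split_ifs at h with h1 h2
  · exact h1
  · omega
  · exfalso; omega

lemma pvMu_step (n : Int) (hi : pvInv n) (hne : pvT n ≠ n) : pvMu (pvT n) < pvMu n := by
  have h0 : 0 ≤ n := hi.resolve_right hne
  have ht := pvT_eq n
  by_cases h1 : 50 ≤ n ∧ n % 2 = 0
  · have hm : pvT n = n / 2 := by rw [ht, if_pos h1]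
    have hμn : pvMu n = 46 + Nat.log 2 n.toNat := by
      rw [pvMu, if_neg hne, if_pos h1.1]
    by_cases hf : pvT (pvT n) = pvT n
    · have : pvMu (pvT n) = 0 := by rw [pvMu, if_pos hf]
      omega
    · by_cases h50 : 50 ≤ n / 2
      · have hdiv : (n/2).toNat = n.toNat / 2 := by omega
        have hlg : Nat.log 2 ((n/2).toNat) = Nat.log 2 n.toNat - 1 := by
          rw [hdiv, Nat.log_div_base]
        have hpos : 0 < Nat.log 2 n.toNat := Nat.log_pos (by norm_num) (by omega)
        have : pvMu (pvT n) = 46 + Nat.log 2 ((pvT n).toNat) := by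
          rw [pvMu, if_neg hf, if_pos (hm ▸ h50)]
        rw [this, hm, hlg]; omega
      · have : pvMu (pvT n) = (64 - pvT n).toNat := by
          rw [pvMu, if_neg hf, if_neg (hm ▸ h50)]
        rw [this, hm]; omega
  · by_cases h2 : n < 50 ∧ n % 2 = 1
    · have hm : pvT n = n * 2 + 1 := by rw [ht, if_neg h1, if_pos h2]
      have hμn : pvMu n = (64 - n).toNat := by
        rw [pvMu, if_neg hne, if_neg (by omega : ¬ 50 ≤ n)]
      have hn1 : 1 ≤ n := by omega
      by_cases hf : pvT (pvT n) = pvT n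
      · have : pvMu (pvT n) = 0 := by rw [pvMu, if_pos hf]
        omega
      · have h50m : ¬ 50 ≤ n * 2 + 1 := by
          intro hge
          apply hf
          rw [hm, pvT_eq]
          rw [if_neg (by omega), if_neg (by omega)]
        have : pvMu (pvT n) = (64 - pvT n).toNat := by
          rw [pvMu, if_neg hf, if_neg (hm ▸ h50m)]
        rw [this, hm]; omega
    · exact absurd (by rw [ht, if_neg h1, if_neg h2]) hne

-- elements admitted by Dom ∧ Pre are "good"
def pvGood (n : Int) : Prop := pvInv n ∧ pvMu n < 98

lemma pvGood_step (n : Int) (h : pvGood n) : pvGood (pvT n) := by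
  refine ⟨pvInv_step n h.1, ?_⟩
  by_cases hf : pvT n = n
  · rw [hf]; exact h.2
  · exact lt_trans (pvMu_step n h.1 hf) h.2

-- fuel independence of pvBSteps (strong induction on the measure)
lemma pvBSteps_fuel : ∀ (k : Nat) (n : Int), pvMu n ≤ k → pvInv n →
    ∀ (f g : Nat) (c : Int), pvMu n < f → pvMu n < g → pvBSteps f n c = pvBSteps g n c := by
  intro k
  induction k with
  | zero =>
    intro n hk _ f g c hf hg
    have hfix : pvT n = n := pvMu_zero n (by omega)
    obtain ⟨f', rfl⟩ : ∃ f', f = f' + 1 := ⟨f - 1, by omega⟩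
    obtain ⟨g', rfl⟩ : ∃ g', g = g' + 1 := ⟨g - 1, by omega⟩
    rw [pvBSteps_succ, pvBSteps_succ, if_pos hfix, if_pos hfix]
  | succ k ih =>
    intro n hk hi f g c hf hg
    obtain ⟨f', rfl⟩ : ∃ f', f = f' + 1 := ⟨f - 1, by omega⟩
    obtain ⟨g', rfl⟩ : ∃ g', g = g' + 1 := ⟨g - 1, by omega⟩
    rw [pvBSteps_succ, pvBSteps_succ]
    by_cases hfix : pvT n = n
    · rw [if_pos hfix, if_pos hfix]
    · rw [if_neg hfix, if_neg hfix]
      have hlt := pvMu_step n hi hfix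
      exact ih (pvT n) (by omega) (pvInv_step n hi) f' g' (c+1) (by omega) (by omega)

-- the accumulator is additive
lemma pvBSteps_shift : ∀ (k : Nat) (n : Int), pvMu n ≤ k → pvInv n →
    ∀ (f : Nat) (c : Int), pvMu n < f → pvBSteps f n c = c + pvBSteps f n 0 := by
  intro k
  induction k with
  | zero =>
    intro n hk _ f c hf
    have hfix : pvT n = n := pvMu_zero n (by omega)
    obtain ⟨f', rfl⟩ : ∃ f', f = f' + 1 := ⟨f - 1, by omega⟩
    rw [pvBSteps_succ, pvBSteps_succ, if_pos hfix, if_pos hfix]; ring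
  | succ k ih =>
    intro n hk hi f c hf
    obtain ⟨f', rfl⟩ : ∃ f', f = f' + 1 := ⟨f - 1, by omega⟩
    rw [pvBSteps_succ, pvBSteps_succ]
    by_cases hfix : pvT n = n
    · rw [if_pos hfix, if_pos hfix]; ring
    · rw [if_neg hfix, if_neg hfix]
      have hlt := pvMu_step n hi hfix
      have hi' := pvInv_step n hi
      rw [ih (pvT n) (by omega) hi' f' (c+1) (by omega),
          ih (pvT n) (by omega) hi' f' (0+1) (by omega)]
      ring

lemma pvBSteps_ge : ∀ (f : Nat) (n c : Int), c ≤ pvBSteps f n c := by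
  intro f
  induction f with
  | zero => intro n c; exact le_refl _
  | succ f ih =>
    intro n c
    rw [pvBSteps_succ]
    by_cases hfix : pvT n = n
    · rw [if_pos hfix]
    · rw [if_neg hfix]; have := ih (pvT n) (c+1); omega

lemma pvS_nonneg (n : Int) : 0 ≤ pvS n := pvBSteps_ge 100 n 0

lemma pvS_fix (n : Int) (h : pvT n = n) : pvS n = 0 := by
  unfold pvS; rw [pvBSteps_succ, if_pos h]

lemma pvS_succ (n : Int) (hg : pvGood n) (h : pvT n ≠ n) : pvS n = pvS (pvT n) + 1 := by
  have hlt := pvMu_step n hg.1 h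
  have hb := hg.2
  have hi' := pvInv_step n hg.1
  unfold pvS
  rw [pvBSteps_succ, if_neg h,
      pvBSteps_shift (pvMu (pvT n)) (pvT n) le_rfl hi' 99 (0+1) (by omega),
      pvBSteps_fuel (pvMu (pvT n)) (pvT n) le_rfl hi' 99 100 0 (by omega) (by omega)]
  ring

lemma pvS_le_mu (n : Int) (hg : pvGood n) : pvS n ≤ (pvMu n : Int) := by
  obtain ⟨hi, hb⟩ := hg
  have : ∀ (k : Nat) (n : Int), pvMu n ≤ k → pvInv n → pvMu n < 98 → pvS n ≤ (pvMu n : Int) := by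
    intro k
    induction k with
    | zero =>
      intro n hk hi _
      rw [pvS_fix n (pvMu_zero n (by omega))]; omega
    | succ k ih =>
      intro n hk hi hb
      by_cases hfix : pvT n = n
      · rw [pvS_fix n hfix]; omega
      · have hlt := pvMu_step n hi hfix
        rw [pvS_succ n ⟨hi, hb⟩ hfix]
        have := ih (pvT n) (by omega) (pvInv_step n hi) (by omega)
        omega
  exact this (pvMu n) n le_rfl hi hb

lemma pvS_t (n : Int) (hg : pvGood n) : pvS (pvT n) = pvG (pvS n) := by
  by_cases hfix : pvT n = n
  · rw [hfix, pvS_fix n hfix]; unfold pvG; omega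
  · have h1 := pvS_succ n hg hfix
    have h2 := pvS_nonneg (pvT n)
    unfold pvG; omega

-- A's transform is the element map
lemma pvATransform_eq (arr : List Int) : pvATransform arr = arr.map pvT := by
  unfold pvATransform
  have hfun : (fun (new_arr : List Int) (num : Int) =>
      if 50 ≤ num ∧ PySem.Int.mod num 2 = 0 then new_arr ++ [PySem.Int.floordiv num 2]
      else if num < 50 ∧ PySem.Int.mod num 2 = 1 then new_arr ++ [num * 2 + 1]
      else new_arr ++ [num]) = fun new_arr num => new_arr ++ [pvT num] := by
    funext new_arr num
    unfold pvT
    split_ifs <;> rfl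
  rw [hfun, PySem.List.foldl_append_singleton_eq_map, List.nil_append]

-- ===== foldl-max toolkit =====

lemma foldl_max_init (l : List Int) : ∀ a : Int, a ≤ l.foldl max a := by
  induction l with
  | nil => intro a; simp
  | cons x xs ih => intro a; have := ih (max a x); simp only [List.foldl_cons]; omega

lemma foldl_max_mem (l : List Int) : ∀ (a x : Int), x ∈ l → x ≤ l.foldl max a := by
  induction l with
  | nil => intro a x hx; simp at hx
  | cons y ys ih =>
    intro a x hx
    rcases List.mem_cons.mp hx with rfl | hx
    · have := foldl_max_init ys (max a x); simp only [List.foldl_cons]; omega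
    · exact ih (max a y) x hx

lemma foldl_max_le (l : List Int) : ∀ (a B : Int), a ≤ B → (∀ x ∈ l, x ≤ B) → l.foldl max a ≤ B := by
  induction l with
  | nil => intro a B ha _; simpa using ha
  | cons y ys ih =>
    intro a B ha hB
    simp only [List.foldl_cons]
    exact ih (max a y) B (by have := hB y (by simp); omega) (fun x hx => hB x (by simp [hx]))

lemma foldl_max_G (l : List Int) : ∀ a : Int, (l.map pvG).foldl max (pvG a) = pvG (l.foldl max a) := by
  induction l with
  | nil => intro a; simp
  | cons x xs ih =>
    intro a
    simp only [List.map_cons, List.foldl_cons]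
    rw [show max (pvG a) (pvG x) = pvG (max a x) by unfold pvG; omega]
    exact ih (max a x)

-- solution_alt as a foldl max over per-element counts
lemma solution_alt_eq (arr : List Int) : solution_alt arr = (arr.map pvS).foldl max 0 := by
  unfold solution_alt pvS
  cases arr with
  | nil => simp
  | cons x xs =>
    simp only [List.map_cons, List.max?, Option.getD_some, List.foldl_cons]
    rw [show max 0 (pvBSteps 100 x 0) = pvBSteps 100 x 0 by have := pvBSteps_ge 100 x 0; omega]

lemma solution_alt_nonneg (arr : List Int) : 0 ≤ solution_alt arr := by
  rw [solution_alt_eq]; exact foldl_max_init _ 0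

lemma solution_alt_le (arr : List Int) (hg : ∀ n ∈ arr, pvGood n) : solution_alt arr ≤ 97 := by
  rw [solution_alt_eq]
  refine foldl_max_le _ 0 97 (by norm_num) ?_
  intro x hx
  obtain ⟨n, hn, rfl⟩ := List.mem_map.mp hx
  have h1 := pvS_le_mu n (hg n hn)
  have h2 := (hg n hn).2
  omega

lemma solution_alt_fix (arr : List Int) (h : ∀ n ∈ arr, pvT n = n) : solution_alt arr = 0 := by
  rw [solution_alt_eq]
  refine le_antisymm (foldl_max_le _ 0 0 le_rfl ?_) (foldl_max_init _ 0)
  intro x hx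
  obtain ⟨n, hn, rfl⟩ := List.mem_map.mp hx
  rw [pvS_fix n (h n hn)]

lemma solution_alt_zero_fix (arr : List Int) (hg : ∀ n ∈ arr, pvGood n)
    (h : solution_alt arr = 0) : ∀ n ∈ arr, pvT n = n := by
  intro n hn
  by_contra hne
  have h1 := pvS_succ n (hg n hn) hne
  have h2 := pvS_nonneg (pvT n)
  have h3 : pvS n ≤ 0 := by
    rw [solution_alt_eq] at h
    have := foldl_max_mem (arr.map pvS) 0 (pvS n) (List.mem_map_of_mem hn)
    omega
  omega

lemma solution_alt_t (arr : List Int) (hg : ∀ n ∈ arr, pvGood n) :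
    solution_alt (arr.map pvT) = pvG (solution_alt arr) := by
  rw [solution_alt_eq, solution_alt_eq, List.map_map]
  have hmap : arr.map (pvS ∘ pvT) = (arr.map pvS).map pvG := by
    rw [List.map_map]
    exact List.map_congr_left (fun n hn => pvS_t n (hg n hn))
  rw [hmap]
  have hG := foldl_max_G (arr.map pvS) 0
  rw [show pvG 0 = 0 from by unfold pvG; omega] at hG
  exact hG

-- fixed point is reached after (solution_alt arr) steps
lemma pvFix_exists (arr : List Int) (hg : ∀ n ∈ arr, pvGood n) :
    ∀ n ∈ (List.map pvT)^[(solution_alt arr).toNat] arr, pvT n = n := by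
  have main : ∀ (k : Nat) (arr : List Int), (∀ n ∈ arr, pvGood n) →
      (solution_alt arr).toNat = k → ∀ n ∈ (List.map pvT)^[k] arr, pvT n = n := by
    intro k
    induction k with
    | zero =>
      intro arr hg hk
      simp only [Function.iterate_zero, id]
      refine solution_alt_zero_fix arr hg ?_
      have := solution_alt_nonneg arr; omega
    | succ k ih =>
      intro arr hg hk
      rw [Function.iterate_succ_apply]
      refine ih (arr.map pvT) (fun n hn => ?_) ?_
      · obtain ⟨m, hm, rfl⟩ := List.mem_map.mp hn
        exact pvGood_step m (hg m hm)
      · rw [solution_alt_t arr hg]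
        have := solution_alt_nonneg arr
        unfold pvG; omega
  exact main (solution_alt arr).toNat arr hg rfl

lemma pvFixed_iterate (arr : List Int) (h : ∀ n ∈ arr, pvT n = n) (j : Nat) :
    (List.map pvT)^[j] arr = arr := by
  have : arr.map pvT = arr := by
    conv_rhs => rw [← List.map_id arr]
    exact List.map_congr_left (fun n hn => h n hn)
  exact Function.iterate_fixed this j

-- no nontrivial cycles: a periodic array is already fixed
lemma pvNoCycle (arr : List Int) (hg : ∀ n ∈ arr, pvGood n) (p : Nat) (hp : 1 ≤ p)
    (hcyc : (List.map pvT)^[p] arr = arr) : ∀ n ∈ arr, pvT n = n := by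
  set K := (solution_alt arr).toNat with hK
  have hfix := pvFix_exists arr hg
  have hmul : (List.map pvT)^[p * K] arr = arr := by
    rw [Function.iterate_mul]
    exact Function.iterate_fixed hcyc K
  have habs : (List.map pvT)^[p * K] arr = (List.map pvT)^[K] arr := by
    have hle : K ≤ p * K := Nat.le_mul_of_pos_left K (by omega)
    have h1 : p * K = (p * K - K) + K := by omega
    rw [h1, Function.iterate_add_apply]
    exact pvFixed_iterate ((List.map pvT)^[K] arr) (by rw [hK]; exact hfix) _
  have harr : arr = (List.map pvT)^[K] arr := hmul.symm.trans habs
  intro n hn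
  have hn' : n ∈ (List.map pvT)^[(solution_alt arr).toNat] arr := by
    rw [← hK, ← harr]; exact hn
  exact hfix n hn'

-- main loop lemma: A's dict loop returns x + solution_alt arr
lemma pvLoopA : ∀ (k : Nat) (arr : List Int) (seen : PySem.Dict (List Int) Int) (x : Int) (f : Nat),
    (∀ n ∈ arr, pvGood n) → solution_alt arr = (k : Int) → k + 2 ≤ f →
    (∀ i : Nat, seen.get? ((List.map pvT)^[i] arr) = none) →
    pvALoop f seen x arr = x + (k : Int) := by
  intro k
  induction k with
  | zero =>
    intro arr seen x f hg hk hf hseen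
    have hfix : ∀ n ∈ arr, pvT n = n := solution_alt_zero_fix arr hg (by exact_mod_cast hk)
    have htr : pvATransform arr = arr := by
      rw [pvATransform_eq]
      conv_rhs => rw [← List.map_id arr]
      exact List.map_congr_left (fun n hn => hfix n hn)
    obtain ⟨f', rfl⟩ : ∃ f', f = f' + 2 := ⟨f - 2, by omega⟩
    have h0 := hseen 0
    simp only [Function.iterate_zero, id] at h0
    have e1 : pvALoop (f' + 1 + 1) seen x arr
        = pvALoop (f' + 1) (seen.insert arr x) (x + 1) (pvATransform arr) := by
      rw [pvALoop, h0]
    have e2 : pvALoop (f' + 1) (seen.insert arr x) (x + 1) arr = x := by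
      rw [pvALoop, PySem.Dict.get?_insert_self]
    rw [e1, htr, e2]; omega
  | succ k ih =>
    intro arr seen x f hg hk hf hseen
    obtain ⟨f', rfl⟩ : ∃ f', f = f' + 1 := ⟨f - 1, by omega⟩
    have h0 := hseen 0
    simp only [Function.iterate_zero, id] at h0
    have e1 : pvALoop (f' + 1) seen x arr
        = pvALoop f' (seen.insert arr x) (x + 1) (pvATransform arr) := by
      rw [pvALoop, h0]
    rw [e1, pvATransform_eq]
    have hg' : ∀ n ∈ arr.map pvT, pvGood n := by
      intro n hn
      obtain ⟨m, hm, rfl⟩ := List.mem_map.mp hn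
      exact pvGood_step m (hg m hm)
    have hnotfix : ¬ (∀ n ∈ arr, pvT n = n) := by
      intro hfix
      have := solution_alt_fix arr hfix
      omega
    have hk' : solution_alt (arr.map pvT) = (k : Int) := by
      rw [solution_alt_t arr hg, hk]
      unfold pvG
      push_cast
      omega
    have hseen' : ∀ i : Nat, (seen.insert arr x).get? ((List.map pvT)^[i] (arr.map pvT)) = none := by
      intro i
      rw [← Function.iterate_succ_apply]
      rw [PySem.Dict.get?_insert]
      have hne : (List.map pvT)^[i+1] arr ≠ arr := by
        intro heq
        exact hnotfix (pvNoCycle arr hg (i+1) (by omega) heq)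
      rw [if_neg hne]
      exact hseen (i+1)
    have := ih (arr.map pvT) (seen.insert arr x) (x + 1) f' hg' hk' (by omega) hseen'
    rw [this]
    push_cast
    ring

lemma pvGood_of_dom_pre (arr : List Int) (hd : Dom_solution arr) (hp : Pre_solution arr) :
    ∀ n ∈ arr, pvGood n := by
  intro n hn
  have hdom : -2147483648 ≤ n ∧ n ≤ 2147483648 := by
    have := List.all_eq_true.mp hd n hn
    simpa [pvDomInt] using this
  have hpre := hp n hn
  have hinv : pvInv n := by
    by_cases hfix : pvT n = n
    · exact Or.inr hfix
    · left
      have ht := pvT_eq n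
      by_cases h1 : 50 ≤ n ∧ n % 2 = 0
      · omega
      · by_cases h2 : n < 50 ∧ n % 2 = 1
        · have hm : pvT n = n * 2 + 1 := by rw [ht, if_neg h1, if_pos h2]
          have : n ≠ -1 := by intro h; apply hfix; rw [hm]; omega
          omega
        · exact absurd (by rw [ht, if_neg h1, if_neg h2]) hfix
  refine ⟨hinv, ?_⟩
  unfold pvMu
  split_ifs with h1 h2
  · omega
  · have hlog : Nat.log 2 n.toNat ≤ 31 := by
      have h1 : n.toNat ≤ 2^31 := by omega
      have := Nat.log_mono_right (b := 2) h1
      rwa [Nat.log_pow (by norm_num)] at this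
    omega
  · have h0 : 0 ≤ n := hinv.resolve_right h1
    omega

-- ===== VERDICT (by name: the statement is the Claim_ definition above) =====
theorem solution_spec : Claim_equal_solution := by
  intro arr hd hp
  unfold Spec_solution solution
  have hg := pvGood_of_dom_pre arr hd hp
  have h1 := solution_alt_nonneg arr
  have h2 := solution_alt_le arr hg
  have := pvLoopA (solution_alt arr).toNat arr PySem.Dict.empty 0 100 hg (by omega) (by omega)
    (fun i => PySem.Dict.get?_empty _)
  rw [this]
  omega
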